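-- pv_equiv track=rewrite | github.com/varshaa369/plivo-stt-postprocessor | src/rules.py | words_to_digits
-- ===== SOURCE A (Python) =====
-- from typing import List
--
-- NUM_WORD = {
--     'zero':'0','oh':'0','one':'1','two':'2','three':'3','four':'4','five':'5',
--     'six':'6','seven':'7','eight':'8','nine':'9'
-- }
--
-- def words_to_digits(seq: List[str]) -> str:
--     """Convert spoken numbers to digits, handling 'double nine' etc."""
--     out = []
--     i = 0
--     while i < len(seq):
--         tok = seq[i].lower()
--         if tok in ('double','triple') and i+1 < len(seq):
--             times = 2 if tok=='double' else 3
--             nxt = seq[i+1].lower()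
--             if nxt in NUM_WORD:
--                 out.append(NUM_WORD[nxt]*times)
--                 i += 2
--                 continue
--         if tok in NUM_WORD:
--             out.append(NUM_WORD[tok])
--             i += 1
--         else:
--             i += 1
--     return ''.join(out)
-- ===== SOURCE B (Python) =====
-- NUM_WORD = {
--     'zero':'0','oh':'0','one':'1','two':'2','three':'3','four':'4','five':'5',
--     'six':'6','seven':'7','eight':'8','nine':'9'
-- }
--
-- def words_to_digits(seq):
--     """Convert spoken numbers to digits, handling 'double nine' etc."""
--     out = []
--     pending = 1
--     for tok in seq:
--         t = tok.lower()
--         if t == 'double':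
--             pending = 2
--         elif t == 'triple':
--             pending = 3
--         elif t in NUM_WORD:
--             out.append(NUM_WORD[t] * pending)
--             pending = 1
--         else:
--             pending = 1
--     return ''.join(out)
-- ===== Notes on version B (the rewrite author's own statement) =====
-- stated objective: simpler
-- what changed: Replaces the index-based while loop with a two-token lookahead by a single stateful for-loop over the tokens carrying a 'pending' multiplier (double/triple set it, a number word consumes it, anything else resets it).
import Mathlib
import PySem

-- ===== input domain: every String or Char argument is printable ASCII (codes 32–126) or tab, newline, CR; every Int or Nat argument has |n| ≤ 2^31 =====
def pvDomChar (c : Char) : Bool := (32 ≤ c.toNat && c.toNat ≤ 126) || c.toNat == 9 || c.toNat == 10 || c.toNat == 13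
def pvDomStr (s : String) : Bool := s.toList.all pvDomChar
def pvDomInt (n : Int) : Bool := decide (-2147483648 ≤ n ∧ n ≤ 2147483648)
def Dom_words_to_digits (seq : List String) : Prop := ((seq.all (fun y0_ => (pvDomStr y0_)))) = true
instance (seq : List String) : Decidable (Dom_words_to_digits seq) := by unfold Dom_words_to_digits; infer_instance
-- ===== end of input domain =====

-- B replaces A's index-based two-token-lookahead while loop by a single stateful
-- left-to-right scan carrying a 'pending' multiplier (objective: simpler).

-- ===== PORT A =====
-- the NUM_WORD module constant
def numWord : PySem.Dict String String :=
  PySem.Dict.ofList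
    [("zero","0"),("oh","0"),("one","1"),("two","2"),("three","3"),("four","4"),
     ("five","5"),("six","6"),("seven","7"),("eight","8"),("nine","9")]

-- Python s*n for a string and a Nat count (exact: list repetition of the characters)
def strMul (s : String) (n : Nat) : String := String.ofList (PySem.List.pyRepeat s.toList (n : Int))

-- the while loop of A, on the index i with accumulator out
def wtdLoop (seq : List String) (i : Nat) (out : List String) : List String :=
  if h : i < seq.length then
    let tok := PySem.Str.lower seq[i]
    if h2 : (tok = "double" ∨ tok = "triple") ∧ i + 1 < seq.length then
      let times : Nat := if tok = "double" then 2 else 3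
      let nxt := PySem.Str.lower (seq[i+1]'h2.2)
      match numWord.get? nxt with
      | some d => wtdLoop seq (i+2) (out ++ [strMul d times])
      | none =>
        -- falls through to the 'tok in NUM_WORD' test, exactly as in Python
        match numWord.get? tok with
        | some d => wtdLoop seq (i+1) (out ++ [d])
        | none => wtdLoop seq (i+1) out
    else
      match numWord.get? tok with
      | some d => wtdLoop seq (i+1) (out ++ [d])
      | none => wtdLoop seq (i+1) out
  else out
termination_by seq.length - i

def words_to_digits (seq : List String) : String :=
  PySem.Str.join "" (wtdLoop seq 0 [])

-- ===== PORT B =====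
-- the for loop of B: structural recursion over the tokens, carrying the pending multiplier
def wtdAltLoop (l : List String) (pending : Nat) (out : List String) : List String :=
  match l with
  | [] => out
  | tok :: rest =>
    let t := PySem.Str.lower tok
    if t = "double" then wtdAltLoop rest 2 out
    else if t = "triple" then wtdAltLoop rest 3 out
    else
      match numWord.get? t with
      | some d => wtdAltLoop rest 1 (out ++ [strMul d pending])
      | none => wtdAltLoop rest 1 out

def words_to_digits_alt (seq : List String) : String :=
  PySem.Str.join "" (wtdAltLoop seq 1 [])

-- ===== PRECONDITION & SPEC =====
def Spec_words_to_digits (seq : List String) (out : String) : Prop := out = words_to_digits_alt seq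
instance (seq : List String) (out : String) : Decidable (Spec_words_to_digits seq out) := by unfold Spec_words_to_digits; infer_instance

-- ===== CLAIM (what is proved, stated in full; the proofs are below) =====
def Claim_equal_words_to_digits : Prop := ∀ (seq : List String), Dom_words_to_digits seq → Spec_words_to_digits seq (words_to_digits seq)

-- ===== LEMMAS AND PROOFS =====

theorem strMul_one (s : String) : strMul s 1 = s := by
  simp [strMul, PySem.List.pyRepeat]

theorem numWord_double : numWord.get? "double" = none := by decide
theorem numWord_triple : numWord.get? "triple" = none := by decide

-- pending is irrelevant when the head of the list is not a number word
theorem wtdAltLoop_pending_irrel (l : List String) (p q : Nat) (out : List String)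
    (h : l = [] ∨ ∃ x rest, l = x :: rest ∧ numWord.get? (PySem.Str.lower x) = none) :
    wtdAltLoop l p out = wtdAltLoop l q out := by
  rcases h with h | ⟨x, rest, rfl, hx⟩
  · subst h; rfl
  · simp only [wtdAltLoop, hx]

-- head of a multiplier tail: either the list ended or its head is not a number word
theorem drop_tail_not_num (seq : List String) (i : Nat)
    (hcase : ∀ h : i + 1 < seq.length, numWord.get? (PySem.Str.lower (seq[i+1]'h)) = none) :
    seq.drop (i+1) = [] ∨
      ∃ x rest, seq.drop (i+1) = x :: rest ∧ numWord.get? (PySem.Str.lower x) = none := by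
  by_cases hnext : i + 1 < seq.length
  · exact Or.inr ⟨seq[i+1]'hnext, seq.drop (i+2), List.drop_eq_getElem_cons hnext, hcase hnext⟩
  · exact Or.inl (List.drop_eq_nil_of_le (by omega))

-- the core correspondence: A's loop from index i equals B's loop on the dropped suffix with pending 1
theorem wtd_core (seq : List String) (i : Nat) (out : List String) :
    wtdLoop seq i out = wtdAltLoop (seq.drop i) 1 out := by
  by_cases hi : i < seq.length
  · have hdrop : seq.drop i = seq[i] :: seq.drop (i+1) := List.drop_eq_getElem_cons hi
    rw [wtdLoop, dif_pos hi, hdrop]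
    by_cases hD : PySem.Str.lower seq[i] = "double"
    · -- tok = 'double'
      have hrhs : wtdAltLoop (seq[i] :: seq.drop (i+1)) 1 out
          = wtdAltLoop (seq.drop (i+1)) 2 out := by
        simp only [wtdAltLoop]; rw [if_pos hD]
      rw [hrhs]
      by_cases hnext : i + 1 < seq.length
      · have h2 : (PySem.Str.lower seq[i] = "double" ∨ PySem.Str.lower seq[i] = "triple")
            ∧ i + 1 < seq.length := ⟨Or.inl hD, hnext⟩
        rw [dif_pos h2]
        have hdrop2 : seq.drop (i+1) = seq[i+1] :: seq.drop (i+2) := List.drop_eq_getElem_cons hnext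
        rcases hget : numWord.get? (PySem.Str.lower seq[i+1]) with _ | d
        · -- next not a number word: A skips the multiplier; B carries pending 2 harmlessly
          simp only [hget, hD, numWord_double]
          rw [wtd_core seq (i+1) out,
            wtdAltLoop_pending_irrel _ 2 1 out (drop_tail_not_num seq i (fun _ => hget))]
        · -- 'double <num>': both consume it
          simp only [hget, if_pos hD]
          have hx : ¬ PySem.Str.lower seq[i+1] = "double" := by
            intro h; rw [h, numWord_double] at hget; cases hget
          have hy : ¬ PySem.Str.lower seq[i+1] = "triple" := by
            intro h; rw [h, numWord_triple] at hget; cases hget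
          rw [hdrop2]
          simp only [wtdAltLoop]
          rw [if_neg hx, if_neg hy]
          simp only [hget]
          exact wtd_core seq (i+2) (out ++ [strMul d 2])
      · -- 'double' is the last token: nothing appended on either side
        have h2 : ¬ ((PySem.Str.lower seq[i] = "double" ∨ PySem.Str.lower seq[i] = "triple")
            ∧ i + 1 < seq.length) := fun h => hnext h.2
        rw [dif_neg h2]
        simp only [hD, numWord_double]
        rw [wtd_core seq (i+1) out, List.drop_eq_nil_of_le (by omega : seq.length ≤ i + 1)]
        rfl
    · by_cases hT : PySem.Str.lower seq[i] = "triple"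
      · -- tok = 'triple' (symmetric to 'double')
        have hrhs : wtdAltLoop (seq[i] :: seq.drop (i+1)) 1 out
            = wtdAltLoop (seq.drop (i+1)) 3 out := by
          simp only [wtdAltLoop]; rw [if_neg hD, if_pos hT]
        rw [hrhs]
        by_cases hnext : i + 1 < seq.length
        · have h2 : (PySem.Str.lower seq[i] = "double" ∨ PySem.Str.lower seq[i] = "triple")
              ∧ i + 1 < seq.length := ⟨Or.inr hT, hnext⟩
          rw [dif_pos h2]
          have hdrop2 : seq.drop (i+1) = seq[i+1] :: seq.drop (i+2) := List.drop_eq_getElem_cons hnext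
          rcases hget : numWord.get? (PySem.Str.lower seq[i+1]) with _ | d
          · simp only [hget, hT, numWord_triple]
            rw [wtd_core seq (i+1) out,
              wtdAltLoop_pending_irrel _ 3 1 out (drop_tail_not_num seq i (fun _ => hget))]
          · simp only [hget, if_neg hD]
            have hx : ¬ PySem.Str.lower seq[i+1] = "double" := by
              intro h; rw [h, numWord_double] at hget; cases hget
            have hy : ¬ PySem.Str.lower seq[i+1] = "triple" := by
              intro h; rw [h, numWord_triple] at hget; cases hget
            rw [hdrop2]
            simp only [wtdAltLoop]
            rw [if_neg hx, if_neg hy]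
            simp only [hget]
            exact wtd_core seq (i+2) (out ++ [strMul d 3])
        · have h2 : ¬ ((PySem.Str.lower seq[i] = "double" ∨ PySem.Str.lower seq[i] = "triple")
              ∧ i + 1 < seq.length) := fun h => hnext h.2
          rw [dif_neg h2]
          simp only [hT, numWord_triple]
          rw [wtd_core seq (i+1) out, List.drop_eq_nil_of_le (by omega : seq.length ≤ i + 1)]
          rfl
      · -- ordinary token
        have h2 : ¬ ((PySem.Str.lower seq[i] = "double" ∨ PySem.Str.lower seq[i] = "triple")
            ∧ i + 1 < seq.length) := fun h => h.1.elim hD hT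
        rw [dif_neg h2]
        simp only [wtdAltLoop]
        rw [if_neg hD, if_neg hT]
        rcases hget : numWord.get? (PySem.Str.lower seq[i]) with _ | d
        · exact wtd_core seq (i+1) out
        · show wtdLoop seq (i+1) (out ++ [d])
              = wtdAltLoop (List.drop (i+1) seq) 1 (out ++ [strMul d 1])
          rw [strMul_one]
          exact wtd_core seq (i+1) (out ++ [d])
  · rw [wtdLoop, dif_neg hi, List.drop_eq_nil_of_le (by omega)]
    rfl
termination_by seq.length - i

-- ===== VERDICT (by name: the statement is the Claim_ definition above) =====
theorem words_to_digits_spec : Claim_equal_words_to_digits := by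
  intro seq _
  unfold Spec_words_to_digits words_to_digits words_to_digits_alt
  rw [wtd_core seq 0 []]
  rfl
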